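-- pv_equiv track=rewrite | github.com/jinmyeongAN/AudioHateXplain | src/utils/get_audioHateXplain_to_cascaded.py | get_majority_rationale
-- ===== SOURCE A (Python) =====
-- def get_majority_rationale(rationale_list):
--     majority_rationale = []
--     for idx in range(len(rationale_list[0])):
--         candidated_len = 0
--         candidated_sum = 0
--         for rationale in rationale_list:
--             try:
--                 candidated_sum += rationale[idx]
--                 candidated_len += 1
--             except:
--                 candidated_sum += 0
--                 candidated_len += 0
--
--         majority_ratinale_element = 1 if candidated_sum / candidated_len >= 0.5 else 0
--         majority_rationale.append(majority_ratinale_element)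
--
--     return majority_rationale
-- ===== SOURCE B (Python) =====
-- def get_majority_rationale(rationale_list):
--     L = len(rationale_list[0])
--     sums = [0] * L
--     counts = [0] * L
--     for row in rationale_list:
--         for idx in range(min(L, len(row))):
--             sums[idx] += row[idx]
--             counts[idx] += 1
--     return [1 if 2 * sums[i] >= counts[i] else 0 for i in range(L)]
-- ===== Notes on version B (the rewrite author's own statement) =====
-- stated objective: alternative
-- what changed: Column-major nested rescan of all rows per index is replaced by a single row-major pass maintaining per-index sum and count tables, with the 0.5 threshold tested by exact integer comparison 2*sum >= count.
import Mathlib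
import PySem

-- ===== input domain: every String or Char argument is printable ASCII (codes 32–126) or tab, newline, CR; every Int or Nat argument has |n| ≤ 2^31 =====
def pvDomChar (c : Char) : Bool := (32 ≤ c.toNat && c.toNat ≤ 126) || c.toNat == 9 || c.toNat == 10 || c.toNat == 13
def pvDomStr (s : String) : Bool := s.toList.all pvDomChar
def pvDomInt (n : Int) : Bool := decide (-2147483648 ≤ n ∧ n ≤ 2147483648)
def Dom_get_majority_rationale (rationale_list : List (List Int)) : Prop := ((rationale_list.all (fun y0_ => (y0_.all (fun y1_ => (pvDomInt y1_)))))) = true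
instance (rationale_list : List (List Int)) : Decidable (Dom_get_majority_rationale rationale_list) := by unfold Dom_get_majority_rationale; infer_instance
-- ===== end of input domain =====

-- B replaces A's column-major rescan of all rows per index by one row-major pass over
-- per-index sum/count tables; same return values, similar cost (objective: alternative).


-- ===== PORT A =====
-- Literal port of A.  'rationale[idx]' with the bare except is pyGet?: the only exception
-- reachable on List Int inputs is IndexError, on which nothing is added.  The comparison
-- 'candidated_sum / candidated_len >= 0.5' is rendered exactly over the integers as
-- 2*sum ≥ len (equivalent to the rational comparison; len ≥ 1 here since row 0 always
-- supplies index idx).  The empty input (IndexError on rationale_list[0]) is excluded by Pre_.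
def get_majority_rationale (rationale_list : List (List Int)) : List Int :=
  match PySem.List.pyGet? rationale_list 0 with
  | none => []   -- unreachable under Pre_
  | some first =>
    (PySem.List.pyRange 0 (first.length : Int) 1).foldl (fun acc idx =>
      let p : Int × Int := rationale_list.foldl (fun (p : Int × Int) rationale =>
        match PySem.List.pyGet? rationale idx with
        | some v => (p.1 + v, p.2 + 1)
        | none => p) (0, 0)
      acc ++ [if 2 * p.1 ≥ p.2 then (1 : Int) else 0]) []

-- ===== PORT B =====
-- sums[idx] += row[idx] for idx < min(L, len(row)): walk the table and the row together.
def pvAddRow : List Int → List Int → List Int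
  | s, [] => s
  | [], _ => []
  | a :: s, v :: r => (a + v) :: pvAddRow s r

-- counts[idx] += 1 for idx < min(L, len(row))
def pvBumpRow : List Int → List Int → List Int
  | c, [] => c
  | [], _ => []
  | a :: c, _ :: r => (a + 1) :: pvBumpRow c r

def get_majority_rationale_alt (rationale_list : List (List Int)) : List Int :=
  let L := (rationale_list.headD []).length
  let st := rationale_list.foldl
    (fun (st : List Int × List Int) row => (pvAddRow st.1 row, pvBumpRow st.2 row))
    (List.replicate L 0, List.replicate L 0)
  List.zipWith (fun s c => if 2 * s ≥ c then (1 : Int) else 0) st.1 st.2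

-- ===== PRECONDITION & SPEC =====
-- A (and B) raise IndexError on the empty list (rationale_list[0]); only that input is excluded.
def Pre_get_majority_rationale (rationale_list : List (List Int)) : Prop := rationale_list ≠ []
instance (rationale_list : List (List Int)) : Decidable (Pre_get_majority_rationale rationale_list) := by unfold Pre_get_majority_rationale; infer_instance
def pvWitness_get_majority_rationale : List (List Int) := [[1, 0], [0, 0]]
def Spec_get_majority_rationale (rationale_list : List (List Int)) (out : List Int) : Prop := out = get_majority_rationale_alt rationale_list
instance (rationale_list : List (List Int)) (out : List Int) : Decidable (Spec_get_majority_rationale rationale_list out) := by unfold Spec_get_majority_rationale; infer_instance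

-- ===== CLAIM (what is proved, stated in full; the proofs are below) =====
def Claim_equal_get_majority_rationale : Prop := ∀ (rationale_list : List (List Int)), Dom_get_majority_rationale rationale_list → Pre_get_majority_rationale rationale_list → Spec_get_majority_rationale rationale_list (get_majority_rationale rationale_list)

-- ===== LEMMAS AND PROOFS =====

theorem pvAddRow_length (s r : List Int) : (pvAddRow s r).length = s.length := by
  induction s generalizing r with
  | nil => cases r <;> simp [pvAddRow]
  | cons a s ih => cases r <;> simp [pvAddRow, ih]

theorem pvBumpRow_length (s r : List Int) : (pvBumpRow s r).length = s.length := by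
  induction s generalizing r with
  | nil => cases r <;> simp [pvBumpRow]
  | cons a s ih => cases r <;> simp [pvBumpRow, ih]

theorem pvAddRow_getD (s r : List Int) (i : Nat) (hi : i < s.length) :
    (pvAddRow s r).getD i 0 = s.getD i 0 + r.getD i 0 := by
  induction s generalizing r i with
  | nil => simp at hi
  | cons a s ih =>
    cases r with
    | nil => simp [pvAddRow]
    | cons v r =>
      cases i with
      | zero => simp [pvAddRow]
      | succ n => simpa [pvAddRow] using ih r n (by simpa using hi)

theorem pvBumpRow_getD (s r : List Int) (i : Nat) (hi : i < s.length) :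
    (pvBumpRow s r).getD i 0 = s.getD i 0 + (if i < r.length then (1 : Int) else 0) := by
  induction s generalizing r i with
  | nil => simp at hi
  | cons a s ih =>
    cases r with
    | nil => simp [pvBumpRow]
    | cons v r =>
      cases i with
      | zero => simp [pvBumpRow]
      | succ n => simpa [pvBumpRow] using ih r n (by simpa using hi)

theorem pvFold_length (rs : List (List Int)) (s c : List Int) :
    (rs.foldl (fun (st : List Int × List Int) row => (pvAddRow st.1 row, pvBumpRow st.2 row)) (s, c)).1.length = s.length ∧
    (rs.foldl (fun (st : List Int × List Int) row => (pvAddRow st.1 row, pvBumpRow st.2 row)) (s, c)).2.length = c.length := by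
  induction rs generalizing s c with
  | nil => simp
  | cons row rs ih =>
    simpa [pvAddRow_length, pvBumpRow_length] using ih (pvAddRow s row) (pvBumpRow c row)

theorem pvFold_getD (rs : List (List Int)) (s c : List Int) (i : Nat)
    (hs : i < s.length) (hc : i < c.length) :
    (rs.foldl (fun (st : List Int × List Int) row => (pvAddRow st.1 row, pvBumpRow st.2 row)) (s, c)).1.getD i 0
      = rs.foldl (fun a row => a + row.getD i 0) (s.getD i 0) ∧
    (rs.foldl (fun (st : List Int × List Int) row => (pvAddRow st.1 row, pvBumpRow st.2 row)) (s, c)).2.getD i 0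
      = rs.foldl (fun a row => a + (if i < row.length then (1 : Int) else 0)) (c.getD i 0) := by
  induction rs generalizing s c with
  | nil => simp
  | cons row rs ih =>
    rw [List.foldl_cons, List.foldl_cons, List.foldl_cons]
    have h := ih (pvAddRow s row) (pvBumpRow c row)
      (by rwa [pvAddRow_length]) (by rwa [pvBumpRow_length])
    rw [pvAddRow_getD s row i hs, pvBumpRow_getD c row i hc] at h
    exact h

-- A's inner pair-fold splits into a sum fold and a count fold (index is a Nat cast).
theorem pvColFold (rs : List (List Int)) (i : Nat) (p : Int × Int) :
    rs.foldl (fun (p : Int × Int) rationale =>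
        match PySem.List.pyGet? rationale (i : Int) with
        | some v => (p.1 + v, p.2 + 1)
        | none => p) p
      = (rs.foldl (fun a row => a + row.getD i 0) p.1,
         rs.foldl (fun a row => a + (if i < row.length then (1 : Int) else 0)) p.2) := by
  induction rs generalizing p with
  | nil => simp
  | cons row rs ih =>
    rw [List.foldl_cons, List.foldl_cons, List.foldl_cons]
    by_cases h : i < row.length
    · have hv : PySem.List.pyGet? row (i : Int) = some row[i] := by
        simp [PySem.List.pyGet?_natCast, List.getElem?_eq_getElem h]
      simp only [hv]
      rw [ih (p.1 + row[i], p.2 + 1), List.getD_eq_getElem _ _ h, if_pos h]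
    · have hv : PySem.List.pyGet? row (i : Int) = none := by
        simp only [PySem.List.pyGet?_natCast, List.getElem?_eq_none_iff]; omega
      simp only [hv]
      rw [ih p, List.getD_eq_default _ _ (by omega), if_neg h]
      simp

-- ===== VERDICT (by name: the statement is the Claim_ definition above) =====
theorem get_majority_rationale_spec : Claim_equal_get_majority_rationale := by
  intro rl _ hpre
  unfold Spec_get_majority_rationale
  obtain ⟨r0, rs, rfl⟩ : ∃ r0 rs, rl = r0 :: rs := by
    cases rl with
    | nil => exact absurd rfl hpre
    | cons a l => exact ⟨a, l, rfl⟩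
  set L := r0.length with hL
  -- reduce A to a map over List.range L
  have hA : get_majority_rationale (r0 :: rs)
      = (List.range L).map (fun k =>
          if 2 * ((r0 :: rs).foldl (fun a row => a + row.getD k 0) 0)
             ≥ ((r0 :: rs).foldl (fun a row => a + (if k < row.length then (1 : Int) else 0)) 0)
          then (1 : Int) else 0) := by
    unfold get_majority_rationale
    simp only [PySem.List.pyGet?_zero_cons]
    rw [PySem.List.foldl_append_singleton_eq_map]
    rw [PySem.List.pyRange_one]
    simp only [List.map_map, Int.sub_zero, Int.toNat_natCast]
    refine List.map_congr_left (fun k hk => ?_)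
    simp only [Function.comp_apply, Int.zero_add]
    rw [pvColFold (r0 :: rs) k (0, 0)]
  rw [hA]
  -- reduce B to the same map
  unfold get_majority_rationale_alt
  simp only [List.headD_cons, ← hL]
  set st := (r0 :: rs).foldl (fun (st : List Int × List Int) row => (pvAddRow st.1 row, pvBumpRow st.2 row)) (List.replicate L 0, List.replicate L 0) with hst
  have hlen1 : st.1.length = L := by
    rw [hst]; simpa using (pvFold_length (r0 :: rs) (List.replicate L 0) (List.replicate L 0)).1
  have hlen2 : st.2.length = L := by
    rw [hst]; simpa using (pvFold_length (r0 :: rs) (List.replicate L 0) (List.replicate L 0)).2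
  apply List.ext_getElem
  · simp [hlen1, hlen2]
  · intro i h1 h2
    have hiL : i < L := by simpa [hlen1, hlen2] using h2
    have hget := pvFold_getD (r0 :: rs) (List.replicate L 0) (List.replicate L 0) i
      (by simpa using hiL) (by simpa using hiL)
    rw [← hst] at hget
    have h0 : (List.replicate L (0 : Int)).getD i 0 = 0 := by
      simp
    rw [h0] at hget
    have e1 : st.1[i]'(by omega) = (r0 :: rs).foldl (fun a row => a + row.getD i 0) 0 := by
      have := hget.1
      rwa [List.getD_eq_getElem _ _ (by omega)] at this
    have e2 : st.2[i]'(by omega) = (r0 :: rs).foldl (fun a row => a + (if i < row.length then (1 : Int) else 0)) 0 := by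
      have := hget.2
      rwa [List.getD_eq_getElem _ _ (by omega)] at this
    simp only [List.getElem_map, List.getElem_range, List.getElem_zipWith]
    rw [e1, e2]
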